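-- pv_equiv track=rewrite | github.com/jrfdy6/aiclone | backend/app/services/lab_experiment_service.py | _probe_held_on_target_provider
-- ===== SOURCE A (Python) =====
-- from typing import Any, Dict, List
--
-- TARGET_PROVIDER = "openai"
--
-- TARGET_MODEL = "gpt-4o-mini"
--
-- def _probe_held_on_target_provider(provider_trace: list[dict[str, Any]]) -> bool:
--     if not provider_trace:
--         return False
--     saw_success = False
--     for item in provider_trace:
--         provider = str(item.get("provider") or "").strip().lower()
--         model = str(item.get("actual_model") or item.get("requested_model") or "").strip().lower()
--         if provider != TARGET_PROVIDER:
--             return False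
--         if model and model != TARGET_MODEL:
--             return False
--         if str(item.get("status") or "").lower() == "success":
--             saw_success = True
--     return saw_success
-- ===== SOURCE B (Python) =====
-- TARGET_PROVIDER = "openai"
--
-- TARGET_MODEL = "gpt-4o-mini"
--
-- def _probe_held_on_target_provider(provider_trace: list) -> bool:
--     keys = {(str(item.get("provider") or "").strip().lower(),
--              str(item.get("actual_model") or item.get("requested_model") or "").strip().lower())
--             for item in provider_trace}
--     statuses = {str(item.get("status") or "").lower() for item in provider_trace}
--     allowed = {(TARGET_PROVIDER, ""), (TARGET_PROVIDER, TARGET_MODEL)}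
--     return keys <= allowed and "success" in statuses
-- ===== Notes on version B (the rewrite author's own statement) =====
-- stated objective: alternative
-- what changed: Instead of A's single accumulator loop with early-return exits, B builds two sets once -- the set of normalized (provider, effective-model) pairs and the set of lowercased statuses -- and answers by a set-subset test against the allowed pairs {(openai,''),(openai,'gpt-4o-mini')} plus a membership test 'success' in statuses; the empty-trace False falls out of the empty status set.
import Mathlib
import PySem

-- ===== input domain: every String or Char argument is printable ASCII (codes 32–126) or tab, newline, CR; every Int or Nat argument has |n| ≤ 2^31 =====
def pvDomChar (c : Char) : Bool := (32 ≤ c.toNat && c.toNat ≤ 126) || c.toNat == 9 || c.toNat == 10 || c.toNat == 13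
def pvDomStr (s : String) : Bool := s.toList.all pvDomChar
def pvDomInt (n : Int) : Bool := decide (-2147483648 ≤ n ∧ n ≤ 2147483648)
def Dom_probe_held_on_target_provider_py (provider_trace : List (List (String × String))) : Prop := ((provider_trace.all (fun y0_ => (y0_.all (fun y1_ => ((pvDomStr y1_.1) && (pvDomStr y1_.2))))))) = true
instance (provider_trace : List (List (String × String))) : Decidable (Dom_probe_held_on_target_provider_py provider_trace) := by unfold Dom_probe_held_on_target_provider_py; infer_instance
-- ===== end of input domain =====

-- B replaces A's single accumulator loop with early exits by building two sets once
-- (normalized (provider, model) pairs; lowercased statuses) and answering with a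
-- subset test against the allowed pairs plus a membership test; objective: alternative.

-- `str(item.get(k) or "")` for a str-valued dict: first-match lookup, missing key ↦ ""
def pvGetS (item : List (String × String)) (k : String) : String :=
  match item with
  | [] => ""
  | (k', v) :: rest => if k' = k then v else pvGetS rest k

-- str(item.get("provider") or "").strip().lower()
def pvProv (item : List (String × String)) : String :=
  PySem.Str.lower (PySem.Str.strip (pvGetS item "provider"))

-- str(item.get("actual_model") or item.get("requested_model") or "").strip().lower()
def pvModel (item : List (String × String)) : String :=
  PySem.Str.lower (PySem.Str.strip
    (if pvGetS item "actual_model" ≠ "" then pvGetS item "actual_model"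
     else pvGetS item "requested_model"))

-- str(item.get("status") or "").lower()
def pvStatus (item : List (String × String)) : String :=
  PySem.Str.lower (pvGetS item "status")

-- ===== PORT A =====
-- the for-loop of A: early return False, accumulator saw_success
def pvALoop : List (List (String × String)) → Bool → Bool
  | [], saw => saw
  | item :: rest, saw =>
    let provider := pvProv item
    let model := pvModel item
    if provider ≠ "openai" then false
    else if model ≠ "" ∧ model ≠ "gpt-4o-mini" then false
    else pvALoop rest (if pvStatus item = "success" then true else saw)

def probe_held_on_target_provider_py (provider_trace : List (List (String × String))) : Bool :=
  if provider_trace = [] then false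
  else pvALoop provider_trace false

-- ===== PORT B =====
-- keys = {(normalized provider, normalized effective model) for item in trace}
def pvKeySet (provider_trace : List (List (String × String))) : PySem.Set (String × String) :=
  PySem.Set.ofList (provider_trace.map (fun item => (pvProv item, pvModel item)))

-- statuses = {lowercased status for item in trace}
def pvStatusSet (provider_trace : List (List (String × String))) : PySem.Set String :=
  PySem.Set.ofList (provider_trace.map pvStatus)

-- allowed = {("openai", ""), ("openai", "gpt-4o-mini")}
def pvAllowed : PySem.Set (String × String) :=
  PySem.Set.ofList [("openai", ""), ("openai", "gpt-4o-mini")]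

def probe_held_on_target_provider_py_alt (provider_trace : List (List (String × String))) : Bool :=
  PySem.Set.issubset (pvKeySet provider_trace) pvAllowed
    && PySem.Set.contains (pvStatusSet provider_trace) "success"

-- ===== PRECONDITION & SPEC =====
def Spec_probe_held_on_target_provider_py (provider_trace : List (List (String × String))) (out : Bool) : Prop := out = probe_held_on_target_provider_py_alt provider_trace
instance (provider_trace : List (List (String × String))) (out : Bool) : Decidable (Spec_probe_held_on_target_provider_py provider_trace out) := by unfold Spec_probe_held_on_target_provider_py; infer_instance

-- ===== CLAIM (what is proved, stated in full; the proofs are below) =====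
def Claim_equal_probe_held_on_target_provider_py : Prop := ∀ (provider_trace : List (List (String × String))), Dom_probe_held_on_target_provider_py provider_trace → Spec_probe_held_on_target_provider_py provider_trace (probe_held_on_target_provider_py provider_trace)

-- ===== LEMMAS AND PROOFS =====

def pvItemOk (item : List (String × String)) : Bool :=
  pvProv item == "openai" && (pvModel item == "" || pvModel item == "gpt-4o-mini")

def pvItemSuccess (item : List (String × String)) : Bool :=
  pvStatus item == "success"

-- loop invariant: A's loop computes "all valid && (saw ∨ some success)"
theorem pvALoop_eq (pt : List (List (String × String))) :
    ∀ saw, pvALoop pt saw = (pt.all pvItemOk && (saw || pt.any pvItemSuccess)) := by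
  induction pt with
  | nil => intro saw; simp [pvALoop]
  | cons item rest ih =>
    intro saw
    simp only [pvALoop, pvItemOk, pvItemSuccess, List.all_cons, List.any_cons, ih]
    generalize pvProv item = p
    generalize pvModel item = m
    generalize pvStatus item = s
    generalize rest.all pvItemOk = A
    generalize rest.any pvItemSuccess = Y
    by_cases h1 : p = "openai" <;>
      by_cases h2 : m = "" <;>
        by_cases h3 : m = "gpt-4o-mini" <;>
          by_cases h4 : s = "success" <;>
            simp_all [beq_iff_eq] <;> rw [beq_eq_false_iff_ne.mpr h4] <;> simp

-- B's subset test = A's per-item validity scan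
theorem pvSubset_eq_all (pt : List (List (String × String))) :
    PySem.Set.issubset (pvKeySet pt) pvAllowed = pt.all pvItemOk := by
  rw [Bool.eq_iff_iff, PySem.Set.issubset_iff, List.all_eq_true]
  constructor
  · intro hc item hmem
    have hk : (pvProv item, pvModel item) ∈ pvKeySet pt := by
      rw [pvKeySet, PySem.Set.mem_ofList]
      exact List.mem_map_of_mem hmem
    have := hc _ hk
    simp only [pvAllowed, PySem.Set.mem_ofList, List.mem_cons, List.mem_singleton,
      Prod.mk.injEq, List.not_mem_nil, or_false] at this
    rcases this with ⟨hp, hm⟩ | ⟨hp, hm⟩ <;> simp [pvItemOk, hp, hm]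
  · intro h x hx
    rw [pvKeySet, PySem.Set.mem_ofList, List.mem_map] at hx
    obtain ⟨item, hmem, rfl⟩ := hx
    have := h item hmem
    simp only [pvItemOk, Bool.and_eq_true, Bool.or_eq_true, beq_iff_eq] at this
    obtain ⟨hp, hm⟩ := this
    simp only [pvAllowed, PySem.Set.mem_ofList, List.mem_cons, Prod.mk.injEq]
    rcases hm with hm | hm
    · exact Or.inl ⟨hp, hm⟩
    · exact Or.inr (Or.inl ⟨hp, hm⟩)

-- B's membership test = A's success scan
theorem pvContains_eq_any (pt : List (List (String × String))) :
    PySem.Set.contains (pvStatusSet pt) "success" = pt.any pvItemSuccess := by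
  rw [Bool.eq_iff_iff, PySem.Set.contains_iff, pvStatusSet, PySem.Set.mem_ofList,
    List.mem_map, List.any_eq_true]
  constructor
  · rintro ⟨item, hmem, heq⟩
    refine ⟨item, hmem, ?_⟩
    simp only [pvItemSuccess, heq]
    exact beq_self_eq_true _
  · rintro ⟨item, hmem, hs⟩
    simp only [pvItemSuccess, beq_iff_eq] at hs
    exact ⟨item, hmem, hs⟩

-- ===== VERDICT (by name: the statement is the Claim_ definition above) =====
theorem probe_held_on_target_provider_py_spec : Claim_equal_probe_held_on_target_provider_py := by
  intro pt _
  unfold Spec_probe_held_on_target_provider_py probe_held_on_target_provider_py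
           probe_held_on_target_provider_py_alt
  rw [pvSubset_eq_all, pvContains_eq_any]
  cases pt with
  | nil => simp
  | cons item rest => rw [if_neg (by simp), pvALoop_eq]; simp
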